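-- pv_equiv track=rewrite | github.com/SpartanPlumbingJosh/juggernaut-autonomy | core/conflict_resolver.py | _are_contradictory
-- ===== SOURCE A (Python) =====
-- from typing import Any, Dict, List, Optional, Set, Tuple
--
-- def _are_contradictory(actions: List[Any]) -> bool:
--     """Check if actions are contradictory."""
--     # Simple heuristic: check for opposing keywords
--     action_strs = [str(a).lower() for a in actions]
--
--     opposing_pairs = [
--         ("start", "stop"),
--         ("enable", "disable"),
--         ("create", "delete"),
--         ("increase", "decrease"),
--         ("on", "off"),
--     ]
--
--     for action in action_strs:
--         for word1, word2 in opposing_pairs: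
--             if word1 in action:
--                 for other_action in action_strs:
--                     if other_action != action and word2 in other_action:
--                         return True
--
--     return False
-- ===== SOURCE B (Python) =====
-- def _are_contradictory(actions):
--     """Check if actions are contradictory."""
--     action_strs = [str(a).lower() for a in actions]
--
--     opposing_pairs = [
--         ("start", "stop"),
--         ("enable", "disable"),
--         ("create", "delete"),
--         ("increase", "decrease"),
--         ("on", "off"),
--     ]
--
--     # Per pair: one pass collecting the distinct strings containing each word;
--     # a contradiction exists iff both sets are inhabited by two different strings.
--     for word1, word2 in opposing_pairs:
--         set1 = {s for s in action_strs if word1 in s}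
--         set2 = {s for s in action_strs if word2 in s}
--         if set1 and set2 and len(set1 | set2) > 1:
--             return True
--     return False
-- ===== Notes on version B (the rewrite author's own statement) =====
-- stated objective: alternative
-- what changed: Replaced the triple nested scan (per action, per pair, rescan all other actions) by one pass per opposing pair that collects the distinct strings containing each keyword and decides contradiction from set emptiness and union cardinality.
import Mathlib
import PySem

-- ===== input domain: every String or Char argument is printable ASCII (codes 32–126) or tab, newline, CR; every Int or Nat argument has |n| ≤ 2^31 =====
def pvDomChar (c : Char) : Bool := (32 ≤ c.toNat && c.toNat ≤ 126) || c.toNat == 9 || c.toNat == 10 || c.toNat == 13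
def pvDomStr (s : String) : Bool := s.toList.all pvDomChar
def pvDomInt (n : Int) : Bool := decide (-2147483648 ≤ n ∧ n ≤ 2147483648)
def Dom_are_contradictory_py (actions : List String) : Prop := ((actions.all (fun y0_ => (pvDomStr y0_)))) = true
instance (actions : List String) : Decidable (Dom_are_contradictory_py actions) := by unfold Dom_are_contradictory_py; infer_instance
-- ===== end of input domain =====

-- B replaces A's per-action rescan of all actions by one pass per opposing pair that
-- collects the distinct strings containing each keyword and tests set emptiness and
-- union cardinality (objective: alternative — a set-based algorithm of similar cost).

-- ===== PORT A =====
def pvOpposingPairs : List (String × String) :=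
  [("start", "stop"), ("enable", "disable"), ("create", "delete"),
   ("increase", "decrease"), ("on", "off")]

def are_contradictory_py (actions : List String) : Bool :=
  let action_strs := actions.map (fun a => PySem.Str.lower a)
  action_strs.any (fun action =>
    pvOpposingPairs.any (fun p =>
      PySem.Str.isIn p.1 action &&
        action_strs.any (fun other => decide (other ≠ action) && PySem.Str.isIn p.2 other)))

-- ===== PORT B =====
def are_contradictory_py_alt (actions : List String) : Bool :=
  let action_strs := actions.map (fun a => PySem.Str.lower a)
  pvOpposingPairs.any (fun p =>
    let s1 : PySem.Set String := PySem.Set.ofList (action_strs.filter (fun s => PySem.Str.isIn p.1 s))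
    let s2 : PySem.Set String := PySem.Set.ofList (action_strs.filter (fun s => PySem.Str.isIn p.2 s))
    decide (s1 ≠ []) && decide (s2 ≠ []) && decide (1 < (PySem.Set.union s1 s2).length))

-- ===== PRECONDITION & SPEC =====
def Spec_are_contradictory_py (actions : List String) (out : Bool) : Prop := out = are_contradictory_py_alt actions
instance (actions : List String) (out : Bool) : Decidable (Spec_are_contradictory_py actions out) := by unfold Spec_are_contradictory_py; infer_instance

-- ===== CLAIM (what is proved, stated in full; the proofs are below) =====
def Claim_equal_are_contradictory_py : Prop := ∀ (actions : List String), Dom_are_contradictory_py actions → Spec_are_contradictory_py actions (are_contradictory_py actions)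

-- ===== LEMMAS AND PROOFS =====

-- a Nodup list of length > 1 has a member different from any given a
lemma pv_exists_ne_of_nodup {α : Type} {l : List α} (hn : l.Nodup) (hl : 1 < l.length)
    (a : α) : ∃ u ∈ l, u ≠ a := by
  match l, hl with
  | x :: y :: t, _ =>
    have hxy : x ≠ y := by
      rintro rfl; simp at hn
    by_cases hx : x = a
    · exact ⟨y, by simp, fun h => hxy (by rw [hx, h])⟩
    · exact ⟨x, by simp, hx⟩

-- two distinct members force length > 1
lemma pv_one_lt_length_of_two_mem {α : Type} {l : List α} {a b : α}
    (ha : a ∈ l) (hb : b ∈ l) (hab : a ≠ b) : 1 < l.length := by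
  match l with
  | [] => simp at ha
  | [x] =>
    simp only [List.mem_singleton] at ha hb
    exact absurd (ha.trans hb.symm) hab
  | x :: y :: t => simp

-- the heart of the equivalence, for one opposing pair (P = "contains word1", Q = "contains word2")
lemma pv_per_pair (L : List String) (P Q : String → Bool) :
    (∃ a ∈ L, P a = true ∧ ∃ t ∈ L, t ≠ a ∧ Q t = true) ↔
      ((PySem.Set.ofList (L.filter P) ≠ [] ∧ PySem.Set.ofList (L.filter Q) ≠ []) ∧
       1 < (PySem.Set.union (PySem.Set.ofList (L.filter P)) (PySem.Set.ofList (L.filter Q))).length) := by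
  have hmem1 : ∀ y, y ∈ PySem.Set.ofList (L.filter P) ↔ y ∈ L ∧ P y = true := by
    intro y; rw [PySem.Set.mem_ofList, List.mem_filter]
  have hmem2 : ∀ y, y ∈ PySem.Set.ofList (L.filter Q) ↔ y ∈ L ∧ Q y = true := by
    intro y; rw [PySem.Set.mem_ofList, List.mem_filter]
  have hmemU : ∀ y, y ∈ PySem.Set.union (PySem.Set.ofList (L.filter P)) (PySem.Set.ofList (L.filter Q)) ↔
      (y ∈ L ∧ P y = true) ∨ (y ∈ L ∧ Q y = true) := by
    intro y; rw [PySem.Set.mem_union, hmem1, hmem2]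
  constructor
  · rintro ⟨a, haL, haP, t, htL, hta, htQ⟩
    refine ⟨⟨fun h => ?_, fun h => ?_⟩, ?_⟩
    · have := (hmem1 a).2 ⟨haL, haP⟩; rw [h] at this; simp at this
    · have := (hmem2 t).2 ⟨htL, htQ⟩; rw [h] at this; simp at this
    · exact pv_one_lt_length_of_two_mem ((hmemU t).2 (Or.inr ⟨htL, htQ⟩))
        ((hmemU a).2 (Or.inl ⟨haL, haP⟩)) hta
  · rintro ⟨⟨h1, h2⟩, hlen⟩
    obtain ⟨a, ha⟩ := List.exists_mem_of_ne_nil _ h1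
    obtain ⟨b, hb⟩ := List.exists_mem_of_ne_nil _ h2
    obtain ⟨haL, haP⟩ := (hmem1 a).1 ha
    obtain ⟨hbL, hbQ⟩ := (hmem2 b).1 hb
    by_cases hab : b = a
    · -- both witnesses may coincide; the union's second element breaks the tie
      subst hab
      have hnd : (PySem.Set.union (PySem.Set.ofList (L.filter P)) (PySem.Set.ofList (L.filter Q))).Nodup :=
        PySem.Set.nodup_union _ _ (PySem.Set.nodup_ofList _)
      obtain ⟨u, huU, hua⟩ := pv_exists_ne_of_nodup hnd hlen b
      rcases (hmemU u).1 huU with ⟨huL, huP⟩ | ⟨huL, huQ⟩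
      · exact ⟨u, huL, huP, b, hbL, fun h => hua h.symm, hbQ⟩
      · exact ⟨b, hbL, haP, u, huL, hua, huQ⟩
    · exact ⟨a, haL, haP, b, hbL, hab, hbQ⟩

theorem are_contradictory_py_eq (actions : List String) :
    are_contradictory_py actions = are_contradictory_py_alt actions := by
  rw [Bool.eq_iff_iff]
  simp only [are_contradictory_py, are_contradictory_py_alt, List.any_eq_true,
    Bool.and_eq_true, decide_eq_true_eq]
  constructor
  · rintro ⟨a, ha, p, hp, h1, t, ht, hne, h2⟩
    exact ⟨p, hp, (pv_per_pair _ _ _).1 ⟨a, ha, h1, t, ht, hne, h2⟩⟩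
  · rintro ⟨p, hp, h⟩
    obtain ⟨a, ha, h1, t, ht, hne, h2⟩ := (pv_per_pair _ _ _).2 h
    exact ⟨a, ha, p, hp, h1, t, ht, hne, h2⟩

-- ===== VERDICT (by name: the statement is the Claim_ definition above) =====
theorem are_contradictory_py_spec : Claim_equal_are_contradictory_py := by
  intro actions _
  unfold Spec_are_contradictory_py
  exact are_contradictory_py_eq actions
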